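-- pv_equiv track=rewrite | github.com/eren23/attocode | src/attocode/code_intel/bug_finder.py | parse_diff_files
-- ===== SOURCE A (Python) =====
-- def parse_diff_files(diff_text: str) -> list[tuple[str, str]]:
--     """Parse a unified diff into (file_path, changed_content) pairs."""
--     files: list[tuple[str, str]] = []
--     current_file = ""
--     current_lines: list[str] = []
--
--     for line in diff_text.split("\n"):
--         if line.startswith("+++ b/"):
--             if current_file and current_lines:
--                 files.append((current_file, "\n".join(current_lines)))
--             current_file = line[6:]
--             current_lines = []
--         elif line.startswith("+") and not line.startswith("+++"):
--             current_lines.append(line[1:])  # Strip the leading +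
--
--     if current_file and current_lines:
--         files.append((current_file, "\n".join(current_lines)))
--
--     return files
-- ===== SOURCE B (Python) =====
-- def _take_body(lines):
--     """Split lines into (body before next '+++ b/' header, remainder from that header)."""
--     body = []
--     for i, l in enumerate(lines):
--         if l.startswith("+++ b/"):
--             return body, lines[i:]
--         body.append(l)
--     return body, []
--
--
-- def _sections(lines):
--     """Group lines into (path, body_lines) sections, one per '+++ b/' header;
--     lines before the first header are dropped."""
--     secs = []
--     while lines:
--         head, rest = lines[0], lines[1:]
--         if head.startswith("+++ b/"):
--             body, lines = _take_body(rest)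
--             secs.append((head[6:], body))
--         else:
--             lines = rest
--     return secs
--
--
-- def parse_diff_files(diff_text: str) -> list[tuple[str, str]]:
--     """Parse a unified diff into (file_path, changed_content) pairs."""
--     out = []
--     for path, body in _sections(diff_text.split("\n")):
--         added = [l[1:] for l in body if l.startswith("+") and not l.startswith("+++")]
--         if path and added:
--             out.append((path, "\n".join(added)))
--     return out
-- ===== Notes on version B (the rewrite author's own statement) =====
-- stated objective: alternative
-- what changed: Replaced A's single interleaved state-machine scan (current_file/current_lines mutated per line, with a trailing flush) by a two-phase group-then-map: first split the line list into header-delimited sections, then independently map each section to its (path, joined added lines) pair.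
import Mathlib
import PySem

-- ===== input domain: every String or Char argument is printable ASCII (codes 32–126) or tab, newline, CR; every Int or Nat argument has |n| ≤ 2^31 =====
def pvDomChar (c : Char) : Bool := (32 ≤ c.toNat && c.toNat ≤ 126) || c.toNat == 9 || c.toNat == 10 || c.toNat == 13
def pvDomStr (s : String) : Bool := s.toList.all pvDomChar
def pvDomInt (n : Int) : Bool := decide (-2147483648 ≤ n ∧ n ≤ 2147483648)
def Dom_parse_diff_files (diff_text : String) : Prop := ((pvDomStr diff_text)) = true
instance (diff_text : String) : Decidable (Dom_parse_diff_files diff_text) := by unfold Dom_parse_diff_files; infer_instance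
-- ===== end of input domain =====

-- B replaces A's single interleaved state-machine scan by a two-phase group-then-map over
-- header-delimited sections (objective: alternative decomposition, same cost).

-- shared primitive predicates/operations, each a direct port of the identical Python expression
-- appearing in both Source A and Source B
def pvIsHeader (l : String) : Bool := PySem.Str.startswith l "+++ b/"
def pvIsAdd (l : String) : Bool := PySem.Str.startswith l "+" && !PySem.Str.startswith l "+++"
def pvStrip1 (l : String) : String := PySem.Str.slice l (some 1) none
-- `if path and lst: out.append((path, "\n".join(lst)))` — the emit step both Pythons contain verbatim
def pvEmit (out : List (String × String)) (p : String) (cls : List String) : List (String × String) :=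
  if p ≠ "" ∧ cls ≠ [] then out ++ [(p, PySem.Str.join "\n" cls)] else out

-- ===== PORT A =====
-- one fold over the lines carrying (files, current_file, current_lines), then the trailing flush
def pvStepA (st : List (String × String) × String × List String) (line : String) :
    List (String × String) × String × List String :=
  if pvIsHeader line then
    (pvEmit st.1 st.2.1 st.2.2, PySem.Str.slice line (some 6) none, [])
  else if pvIsAdd line then
    (st.1, st.2.1, st.2.2 ++ [pvStrip1 line])
  else st

def pvFlush (st : List (String × String) × String × List String) : List (String × String) :=
  pvEmit st.1 st.2.1 st.2.2

def parse_diff_files (diff_text : String) : List (String × String) :=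
  pvFlush (((PySem.Str.split? diff_text "\n").getD []).foldl pvStepA ([], "", []))

-- ===== PORT B =====
-- phase 1: group the lines into (path, body) sections; _take_body in Source B is a span,
-- ported as takeWhile/dropWhile on the not-a-header predicate
def pvSections : List String → List (String × List String)
  | [] => []
  | head :: rest =>
    if pvIsHeader head then
      (PySem.Str.slice head (some 6) none, rest.takeWhile (fun l => !pvIsHeader l))
        :: pvSections (rest.dropWhile (fun l => !pvIsHeader l))
    else pvSections rest
termination_by lines => lines.length
decreasing_by
  · exact Nat.lt_succ_of_le (List.length_dropWhile_le _ _)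
  · simp

-- the comprehension `[l[1:] for l in body if l.startswith("+") and not l.startswith("+++")]`
def pvAdded (body : List String) : List String := (body.filter pvIsAdd).map pvStrip1

-- phase 2: map each section independently to its emitted pair
def pvSecOut (out : List (String × String)) (sec : String × List String) : List (String × String) :=
  pvEmit out sec.1 (pvAdded sec.2)

def parse_diff_files_alt (diff_text : String) : List (String × String) :=
  (pvSections ((PySem.Str.split? diff_text "\n").getD [])).foldl pvSecOut []

-- ===== PRECONDITION & SPEC =====
def Spec_parse_diff_files (diff_text : String) (out : List (String × String)) : Prop := out = parse_diff_files_alt diff_text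
instance (diff_text : String) (out : List (String × String)) : Decidable (Spec_parse_diff_files diff_text out) := by unfold Spec_parse_diff_files; infer_instance

-- ===== CLAIM (what is proved, stated in full; the proofs are below) =====
def Claim_equal_parse_diff_files : Prop := ∀ (diff_text : String), Dom_parse_diff_files diff_text → Spec_parse_diff_files diff_text (parse_diff_files diff_text)

-- ===== LEMMAS AND PROOFS =====

theorem pvEmit_append (out : List (String × String)) (p : String) (cls : List String) :
    pvEmit out p cls = out ++ pvEmit [] p cls := by
  unfold pvEmit; split_ifs <;> simp

theorem pvFoldl_secOut (secs : List (String × List String)) (out : List (String × String)) :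
    secs.foldl pvSecOut out = out ++ secs.foldl pvSecOut [] := by
  induction secs generalizing out with
  | nil => simp
  | cons s ss ih =>
      simp only [List.foldl_cons]
      rw [ih (pvSecOut out s), ih (pvSecOut [] s)]
      show (pvEmit out s.1 (pvAdded s.2)) ++ _ = out ++ (pvEmit [] s.1 (pvAdded s.2) ++ _)
      rw [pvEmit_append out]; simp

-- the in-section invariant: flushing A's fold from state (files, p, cls) yields files, then
-- the emit of the current section (cls plus the added lines of the remaining body), then B's
-- processing of the remaining sections
theorem pvRunA_section (lines : List String) (files : List (String × String)) (p : String)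
    (cls : List String) :
    pvFlush (lines.foldl pvStepA (files, p, cls))
      = files ++ pvEmit [] p (cls ++ pvAdded (lines.takeWhile (fun l => !pvIsHeader l)))
          ++ (pvSections (lines.dropWhile (fun l => !pvIsHeader l))).foldl pvSecOut [] := by
  induction lines generalizing files p cls with
  | nil =>
      simp [pvFlush, pvSections, pvAdded, pvEmit_append files p cls]
  | cons h t ih =>
      rw [List.foldl_cons]
      by_cases hh : pvIsHeader h
      · have hstep : pvStepA (files, p, cls) h
            = (pvEmit files p cls, PySem.Str.slice h (some 6) none, []) := by
          simp [pvStepA, hh]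
        rw [hstep, ih]
        have htw : (h :: t).takeWhile (fun l => !pvIsHeader l) = [] := by
          simp [hh]
        have hdw : (h :: t).dropWhile (fun l => !pvIsHeader l) = h :: t := by
          simp [hh]
        rw [htw, hdw, pvSections]
        simp only [hh, if_true, List.foldl_cons]
        rw [pvFoldl_secOut _ (pvSecOut [] _), pvEmit_append files p cls]
        show (files ++ pvEmit [] p cls)
            ++ pvEmit [] (PySem.Str.slice h (some 6) none)
                ([] ++ pvAdded (t.takeWhile (fun l => !pvIsHeader l))) ++ _ = _
        simp [pvSecOut, pvAdded]
      · by_cases ha : pvIsAdd h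
        · have hstep : pvStepA (files, p, cls) h = (files, p, cls ++ [pvStrip1 h]) := by
            simp [pvStepA, hh, ha]
          rw [hstep, ih]
          have htw : (h :: t).takeWhile (fun l => !pvIsHeader l)
              = h :: t.takeWhile (fun l => !pvIsHeader l) := by
            simp [hh]
          have hdw : (h :: t).dropWhile (fun l => !pvIsHeader l)
              = t.dropWhile (fun l => !pvIsHeader l) := by
            simp [hh]
          rw [htw, hdw]
          simp [pvAdded, ha]
        · have hstep : pvStepA (files, p, cls) h = (files, p, cls) := by
            simp [pvStepA, hh, ha]
          rw [hstep, ih]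
          have htw : (h :: t).takeWhile (fun l => !pvIsHeader l)
              = h :: t.takeWhile (fun l => !pvIsHeader l) := by
            simp [hh]
          have hdw : (h :: t).dropWhile (fun l => !pvIsHeader l)
              = t.dropWhile (fun l => !pvIsHeader l) := by
            simp [hh]
          rw [htw, hdw]
          simp [pvAdded, ha]

-- before the first header current_file is "" so A never emits from the running state
theorem pvRunA_prefix (lines : List String) (files : List (String × String)) (cls : List String) :
    pvFlush (lines.foldl pvStepA (files, "", cls))
      = files ++ (pvSections lines).foldl pvSecOut [] := by
  induction lines generalizing files cls with
  | nil => simp [pvFlush, pvEmit, pvSections]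
  | cons h t ih =>
      rw [List.foldl_cons]
      by_cases hh : pvIsHeader h
      · have hstep : pvStepA (files, "", cls) h
            = (files, PySem.Str.slice h (some 6) none, []) := by
          simp [pvStepA, hh, pvEmit]
        rw [hstep, pvRunA_section, pvSections]
        simp only [hh, if_true, List.foldl_cons]
        rw [pvFoldl_secOut _ (pvSecOut [] _)]
        simp [pvSecOut]
      · by_cases ha : pvIsAdd h
        · have hstep : pvStepA (files, "", cls) h = (files, "", cls ++ [pvStrip1 h]) := by
            simp [pvStepA, hh, ha]
          rw [hstep, ih, pvSections]
          simp [hh]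
        · have hstep : pvStepA (files, "", cls) h = (files, "", cls) := by
            simp [pvStepA, hh, ha]
          rw [hstep, ih, pvSections]
          simp [hh]

-- ===== VERDICT (by name: the statement is the Claim_ definition above) =====
theorem parse_diff_files_spec : Claim_equal_parse_diff_files := by
  intro d _
  unfold Spec_parse_diff_files parse_diff_files parse_diff_files_alt
  rw [pvRunA_prefix]; simp
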